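-- pv_equiv track=rewrite | github.com/AlexPryshchenko/Landmine-detection-with-neural-network | data_preprocessing.py | set_index
-- ===== SOURCE A (Python) =====
-- def set_index(name):
--     # this function allows to set testing signal by defining the object and distance in string form
--     # instead of defining a number of column of array
--     # complexity of this problem is lays in fact that we cant directly see the answer just looking on
--     # the received signal unlike for example in problem of digits recognition.
--     # thus this function is quite necessary, just not to confuse in a numbers of columns ant its labels
--     objects = ['can1', 'can2', 'can3', 'can4', 'can5', 'can6', 'PMN-1', 'PMN-4']  # define all objects
--     distances = ['_0cm', '_5cm', '_10cm', '_15cm', '_20cm', '_25cm', '_30cm', '_35cm']  # define all distances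
--     labels = []  # zero list
--     for i in range(0, 8):
--         for j in range(0, 8):
--             labels.append(objects[j] + distances[i])  # obtaining all cases
--
--     test_sig = 0  # starting index
--     for i in range(0, 64):
--         if name == labels[i]:  # we are running through the "labels" list until defined object and
--             # position (name) will not match with one of the labels[i].
--             test_sig = i + 1  # then we take this index and add 1, because in this project
--             # we are not going to trace 0 output of ANN, which corresponds to absence of object.
--             # thus we are looking at 1-65 outputs. See the categorical decryption in READ_ME.md
--     return test_sig
-- ===== SOURCE B (Python) =====
-- def set_index(name):
--     # Decompose the name instead of enumerating all 64 labels: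
--     # find the distance suffix, strip it, look the object part up.
--     objects = ['can1', 'can2', 'can3', 'can4', 'can5', 'can6', 'PMN-1', 'PMN-4']
--     distances = ['_0cm', '_5cm', '_10cm', '_15cm', '_20cm', '_25cm', '_30cm', '_35cm']
--     for i, d in enumerate(distances):
--         if name.endswith(d):
--             obj = name[:-len(d)]
--             if obj in objects:
--                 return i * 8 + objects.index(obj) + 1
--             return 0
--     return 0
-- ===== Notes on version B (the rewrite author's own statement) =====
-- stated objective: simpler
-- what changed: Instead of enumerating all 64 object+distance labels and equality-scanning the whole list, B decomposes the name: it finds the distance suffix, strips it, looks the object part up, and computes the index arithmetically as i*8 + j + 1.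
import Mathlib
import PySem

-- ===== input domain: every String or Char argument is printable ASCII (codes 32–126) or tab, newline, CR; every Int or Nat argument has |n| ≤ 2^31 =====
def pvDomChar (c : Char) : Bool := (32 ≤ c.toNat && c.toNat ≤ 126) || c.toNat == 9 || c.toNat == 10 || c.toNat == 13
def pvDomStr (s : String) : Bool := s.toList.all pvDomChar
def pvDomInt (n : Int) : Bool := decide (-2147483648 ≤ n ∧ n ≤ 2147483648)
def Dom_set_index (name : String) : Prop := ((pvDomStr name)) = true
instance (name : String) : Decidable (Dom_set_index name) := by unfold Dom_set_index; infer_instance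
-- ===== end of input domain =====

-- B changes A's exhaustive 64-label scan into a suffix-decomposition lookup (simpler); same return value.

-- the module-level object/distance literals, as char lists (strings are ported on List Char)
def objectsL : List (List Char) :=
  ["can1".toList, "can2".toList, "can3".toList, "can4".toList,
   "can5".toList, "can6".toList, "PMN-1".toList, "PMN-4".toList]
def distancesL : List (List Char) :=
  ["_0cm".toList, "_5cm".toList, "_10cm".toList, "_15cm".toList,
   "_20cm".toList, "_25cm".toList, "_30cm".toList, "_35cm".toList]

-- ===== PORT A =====
-- literal transliteration on the char-list form of the string
def setIndexChars (n : List Char) : Int :=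
  let labels : List (List Char) :=
    (PySem.List.pyRange 0 8 1).foldl (fun ls i =>
      (PySem.List.pyRange 0 8 1).foldl (fun ls j =>
        ls ++ [PySem.List.pyGetD objectsL j [] ++ PySem.List.pyGetD distancesL i []]) ls) []
  (PySem.List.pyRange 0 64 1).foldl (fun acc i =>
    if n = PySem.List.pyGetD labels i [] then i + 1 else acc) 0

def set_index (name : String) : Int := setIndexChars name.toList

-- ===== PORT B =====
-- the `for i, d in enumerate(distances)` loop with its two early returns
def altGo (n : List Char) : List (Int × List Char) → Int
  | [] => 0
  | (i, d) :: rest =>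
    if PySem.Chars.endswith n d then
      match PySem.List.index? objectsL (PySem.Chars.slice n none (some (-(d.length : Int)))) with
      | some j => i * 8 + (j : Int) + 1
      | none => 0
    else altGo n rest

def set_index_alt (name : String) : Int :=
  altGo name.toList (PySem.List.enumerate distancesL 0)

-- ===== PRECONDITION & SPEC =====
def Spec_set_index (name : String) (out : Int) : Prop := out = set_index_alt name
instance (name : String) (out : Int) : Decidable (Spec_set_index name out) := by unfold Spec_set_index; infer_instance

-- ===== CLAIM (what is proved, stated in full; the proofs are below) =====
def Claim_equal_set_index : Prop := ∀ (name : String), Dom_set_index name → Spec_set_index name (set_index name)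

-- ===== LEMMAS AND PROOFS =====

-- the 64 labels A builds, written out
def L64 : List (List Char) :=
  (objectsL.map (· ++ "_0cm".toList)) ++ (objectsL.map (· ++ "_5cm".toList)) ++
  (objectsL.map (· ++ "_10cm".toList)) ++ (objectsL.map (· ++ "_15cm".toList)) ++
  (objectsL.map (· ++ "_20cm".toList)) ++ (objectsL.map (· ++ "_25cm".toList)) ++
  (objectsL.map (· ++ "_30cm".toList)) ++ (objectsL.map (· ++ "_35cm".toList))

theorem labels_eq :
    ((PySem.List.pyRange 0 8 1).foldl (fun ls i =>
      (PySem.List.pyRange 0 8 1).foldl (fun ls j =>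
        ls ++ [PySem.List.pyGetD objectsL j [] ++ PySem.List.pyGetD distancesL i []]) ls)
      ([] : List (List Char))) = L64 := by decide

theorem fold_nomatch (n : List Char) (ks : List Int) (acc : Int)
    (h : ∀ i ∈ ks, n ≠ PySem.List.pyGetD L64 i []) :
    ks.foldl (fun acc i => if n = PySem.List.pyGetD L64 i [] then i + 1 else acc) acc = acc := by
  induction ks generalizing acc with
  | nil => rfl
  | cons k ks ih =>
    simp only [List.foldl_cons]
    rw [if_neg (h k (by simp))]
    exact ih acc (fun i hi => h i (by simp [hi]))

theorem decomp (n d obj : List Char) (hd : d ≠ [])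
    (he : PySem.Chars.endswith n d = true)
    (hs : PySem.Chars.slice n none (some (-(d.length : Int))) = obj) :
    n = obj ++ d := by
  rw [PySem.Chars.endswith_iff] at he
  obtain ⟨t, ht⟩ := he
  have hk : 0 < d.length := List.length_pos_iff.mpr hd
  rw [PySem.Chars.slice_eq_listSlice, PySem.List.slice_to_neg_natCast _ _ hk] at hs
  subst ht
  have : (t ++ d).length - d.length = t.length := by simp
  rw [this, List.take_left] at hs
  rw [hs]

theorem concat_mem (obj d : List Char) (ho : obj ∈ objectsL) (hd : d ∈ distancesL) :
    obj ++ d ∈ L64 := by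
  fin_cases ho <;> fin_cases hd <;> decide

theorem chars_eq (n : List Char) :
    setIndexChars n = altGo n (PySem.List.enumerate distancesL 0) := by
  by_cases hmem : n ∈ L64
  · fin_cases hmem <;> decide
  · -- A's fold never matches, so it returns 0
    have ha : setIndexChars n = 0 := by
      simp only [setIndexChars, labels_eq]
      apply fold_nomatch
      intro i hi
      rw [PySem.List.mem_pyRange_one] at hi
      have h0 : 0 ≤ i := hi.1
      have h64 : i < 64 := hi.2
      intro hEq
      apply hmem
      rw [hEq]
      have hlen : i.toNat < L64.length := by
        have : L64.length = 64 := by decide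
        omega
      rw [PySem.List.pyGetD_of_nonneg _ _ h0, List.getD_eq_getElem _ _ hlen]
      exact List.getElem_mem hlen
    -- B returns 0: any successful decomposition would put n inside L64
    have hb : ∀ ps : List (Int × List Char), (∀ p ∈ ps, p.2 ∈ distancesL) → altGo n ps = 0 := by
      intro ps hps
      induction ps with
      | nil => rfl
      | cons p rest ih =>
        obtain ⟨i, d⟩ := p
        simp only [altGo]
        split
        · rename_i he
          split
          · rename_i j hj
            exfalso
            apply hmem
            have ho : PySem.Chars.slice n none (some (-(d.length : Int))) ∈ objectsL :=
              (PySem.List.index?_isSome_iff _ _).mp (by rw [hj]; rfl)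
            have hd : d ∈ distancesL := hps (i, d) (by simp)
            have hdne : d ≠ [] := by
              fin_cases hd <;> decide
            rw [decomp n d _ hdne he rfl]
            exact concat_mem _ _ ho hd
          · rfl
        · exact ih (fun p hp => hps p (by simp [hp]))
    rw [ha, hb _ (by
      intro p hp
      obtain ⟨k, hk, hpe⟩ := (PySem.List.mem_enumerate_iff _ _ _).mp hp
      rw [hpe]
      exact List.getElem_mem hk)]

-- ===== VERDICT (by name: the statement is the Claim_ definition above) =====
theorem set_index_spec : Claim_equal_set_index := by
  intro name _
  show set_index name = set_index_alt name
  exact chars_eq name.toList
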